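-- pv_equiv track=rewrite | github.com/brennansk1/Genetics | src/variant_evidence.py | _pick_most_significant
-- ===== SOURCE A (Python) =====
-- from typing import Dict, List, Optional, Tuple
--
-- def _pick_most_significant(sigs: List[str]) -> str:
--     """Pick the most significant ClinVar classification from a list."""
--     if not sigs:
--         return ""
--     # Priority ranking
--     for priority in ["Pathogenic", "Likely pathogenic", "Uncertain significance",
--                      "Conflicting interpretations", "Likely benign", "Benign"]:
--         for sig in sigs:
--             if priority.lower() in sig.lower():
--                 return sig
--     return sigs[0]
-- ===== SOURCE B (Python) =====
-- _PRIORITIES = ["Pathogenic", "Likely pathogenic", "Uncertain significance",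
--                "Conflicting interpretations", "Likely benign", "Benign"]
--
--
-- def _rank(sig):
--     low = sig.lower()
--     for i, p in enumerate(_PRIORITIES):
--         if p.lower() in low:
--             return i
--     return len(_PRIORITIES)
--
--
-- def _pick_most_significant(sigs):
--     if not sigs:
--         return ""
--     return min(sigs, key=_rank)
-- ===== Notes on version B (the rewrite author's own statement) =====
-- stated objective: simpler
-- what changed: Replaces the priority-outer/sigs-inner nested scan with early return by a per-element rank helper and a single min(sigs, key=rank) selection, relying on min's first-tie rule for the original tie-breaking and fallback.
import Mathlib
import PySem

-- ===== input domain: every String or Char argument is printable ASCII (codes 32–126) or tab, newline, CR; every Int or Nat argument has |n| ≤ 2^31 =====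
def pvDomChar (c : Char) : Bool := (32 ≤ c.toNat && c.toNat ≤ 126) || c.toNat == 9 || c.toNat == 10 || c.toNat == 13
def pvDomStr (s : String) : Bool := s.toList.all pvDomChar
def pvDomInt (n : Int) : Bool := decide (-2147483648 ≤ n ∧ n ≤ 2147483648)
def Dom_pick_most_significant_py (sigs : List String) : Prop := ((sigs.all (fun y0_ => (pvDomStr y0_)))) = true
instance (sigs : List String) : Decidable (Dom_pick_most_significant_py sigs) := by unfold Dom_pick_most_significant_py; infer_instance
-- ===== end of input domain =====

-- B replaces A's priority-outer/sigs-inner nested scan with a per-element rank and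
-- min(sigs, key=rank) (first-tie rule of min reproduces A's tie-breaking and fallback); objective: simpler.

-- ===== PORT A =====
-- the shared priority list
def pvPriorities : List String :=
  ["Pathogenic", "Likely pathogenic", "Uncertain significance",
   "Conflicting interpretations", "Likely benign", "Benign"]

-- inner loop: 'for sig in sigs: if priority.lower() in sig.lower(): return sig'
def pvInner (priority : String) : List String → Option String
  | [] => none
  | s :: rest =>
    if PySem.Str.isIn (PySem.Str.lower priority) (PySem.Str.lower s) then some s
    else pvInner priority rest

-- outer loop over the priority list; 'some' is A's early return
def pvOuter (ps sigs : List String) : Option String :=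
  match ps with
  | [] => none
  | p :: rest =>
    match pvInner p sigs with
    | some s => some s
    | none => pvOuter rest sigs

def pick_most_significant_py (sigs : List String) : String :=
  if sigs = [] then ""
  else
    match pvOuter pvPriorities sigs with
    | some s => s
    | none => sigs.headD ""   -- sigs[0]; sigs is nonempty in this branch

-- ===== PORT B =====
-- _rank: index of the first priority whose lowercase form is a substring of sig.lower(),
-- counted with the enumerate counter; returns len(_PRIORITIES) when none matches
def pvRankGo (low : String) : List String → Nat → Nat
  | [], i => i
  | p :: ps, i =>
    if PySem.Str.isIn (PySem.Str.lower p) low then i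
    else pvRankGo low ps (i + 1)

def pvRank (sig : String) : Nat :=
  pvRankGo (PySem.Str.lower sig) pvPriorities 0

def pick_most_significant_py_alt (sigs : List String) : String :=
  if sigs = [] then ""
  else (PySem.List.min? sigs pvRank).getD ""   -- min(sigs, key=_rank); some, sigs nonempty here

-- ===== PRECONDITION & SPEC =====
def Spec_pick_most_significant_py (sigs : List String) (out : String) : Prop := out = pick_most_significant_py_alt sigs
instance (sigs : List String) (out : String) : Decidable (Spec_pick_most_significant_py sigs out) := by unfold Spec_pick_most_significant_py; infer_instance

-- ===== CLAIM (what is proved, stated in full; the proofs are below) =====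
def Claim_equal_pick_most_significant_py : Prop := ∀ (sigs : List String), Dom_pick_most_significant_py sigs → Spec_pick_most_significant_py sigs (pick_most_significant_py sigs)

-- ===== LEMMAS AND PROOFS =====

-- the fold step of PySem.List.min? for a Nat-valued key on Strings
def pvStep (key : String → Nat) (acc : Option String) (x : String) : Option String :=
  match acc with
  | none => some x
  | some m => if key x < key m then some x else some m

lemma pv_min?_eq_foldl (xs : List String) (key : String → Nat) :
    PySem.List.min? xs key = xs.foldl (pvStep key) none := by
  unfold PySem.List.min?
  congr 1
  funext acc x
  cases acc <;> rfl

-- once the accumulator has key 0, nothing replaces it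
lemma pv_stay_zero (key : String → Nat) (t : List String) (m : String) (hm : key m = 0) :
    t.foldl (pvStep key) (some m) = some m := by
  induction t with
  | nil => rfl
  | cons x t ih =>
    simp only [List.foldl_cons, pvStep, hm]
    rw [if_neg (by omega)]
    exact ih

-- the fold reaches the first key-0 element when the accumulator's key is nonzero
lemma pv_first_zero (key : String → Nat) (q : String → Bool)
    (hq : ∀ s, q s = true ↔ key s = 0) :
    ∀ (t : List String) (m s₀ : String), key m ≠ 0 → t.find? q = some s₀ →
      t.foldl (pvStep key) (some m) = some s₀ := by
  intro t
  induction t with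
  | nil => intro m s₀ _ h; simp at h
  | cons x t ih =>
    intro m s₀ hm h
    by_cases hx : q x = true
    · rw [List.find?_cons_of_pos hx] at h
      cases h
      have hx0 : key x = 0 := (hq x).mp hx
      simp only [List.foldl_cons, pvStep]
      rw [if_pos (by omega)]
      exact pv_stay_zero key t x hx0
    · rw [List.find?_cons_of_neg (by simpa using hx)] at h
      have hx0 : key x ≠ 0 := fun h0 => hx ((hq x).mpr h0)
      simp only [List.foldl_cons, pvStep]
      split
      · exact ih x s₀ hx0 h
      · exact ih m s₀ hm h

-- adding 1 to every key does not change the fold's choices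
lemma pv_shift (key : String → Nat) :
    ∀ (t : List String) (acc : Option String),
      t.foldl (pvStep (fun s => 1 + key s)) acc = t.foldl (pvStep key) acc := by
  intro t
  induction t with
  | nil => intro acc; rfl
  | cons x t ih =>
    intro acc
    have hstep : pvStep (fun s => 1 + key s) acc x = pvStep key acc x := by
      cases acc with
      | none => rfl
      | some m => simp only [pvStep, Nat.add_lt_add_iff_left]
    simp only [List.foldl_cons, hstep, ih]

-- the fold only looks at keys of list elements and of the accumulator
lemma pv_congr (k1 k2 : String → Nat) :
    ∀ (t : List String) (acc : Option String),
      (∀ x ∈ t, k1 x = k2 x) → (∀ m, acc = some m → k1 m = k2 m) →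
      t.foldl (pvStep k1) acc = t.foldl (pvStep k2) acc := by
  intro t
  induction t with
  | nil => intro acc _ _; rfl
  | cons x t ih =>
    intro acc h hacc
    have hx : k1 x = k2 x := h x (by simp)
    have hstep : pvStep k1 acc x = pvStep k2 acc x := by
      cases acc with
      | none => rfl
      | some m => simp [pvStep, hx, hacc m rfl]
    rw [List.foldl_cons, List.foldl_cons, hstep]
    refine ih _ (fun y hy => h y (by simp [hy])) ?_
    intro m hm
    cases acc with
    | none =>
      simp only [pvStep] at hm
      injection hm with h'
      subst h'
      exact hx
    | some m' =>
      simp only [pvStep] at hm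
      split at hm
      · injection hm with h'; subst h'; exact hx
      · injection hm with h'; subst h'; exact hacc m' rfl
  
-- pvInner is find? over the match predicate
lemma pv_inner_eq_find? (p : String) (sigs : List String) :
    pvInner p sigs =
      sigs.find? (fun s => PySem.Str.isIn (PySem.Str.lower p) (PySem.Str.lower s)) := by
  induction sigs with
  | nil => rfl
  | cons s t ih =>
    by_cases h : PySem.Str.isIn (PySem.Str.lower p) (PySem.Str.lower s) = true
    · rw [List.find?_cons_of_pos (by simpa using h)]
      simp only [pvInner]
      rw [if_pos h]
    · rw [List.find?_cons_of_neg (by simpa using h)]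
      simp only [pvInner]
      rw [if_neg (by simpa using h)]
      exact ih

-- the enumerate counter only shifts the result
lemma pv_rankGo_shift (low : String) :
    ∀ (P : List String) (i : Nat), pvRankGo low P i = i + pvRankGo low P 0 := by
  intro P
  induction P with
  | nil => intro i; simp [pvRankGo]
  | cons p ps ih =>
    intro i
    simp only [pvRankGo]
    split
    · simp
    · rw [ih (i + 1), ih 1]; omega

-- core: A's nested loop with fallback equals first-minimum-by-rank, for any priority list
lemma pv_main :
    ∀ (P sigs : List String), sigs ≠ [] →
      (match pvOuter P sigs with
       | some s => s
       | none => sigs.headD "") =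
      (PySem.List.min? sigs (fun s => pvRankGo (PySem.Str.lower s) P 0)).getD "" := by
  intro P
  induction P with
  | nil =>
    intro sigs hne
    cases sigs with
    | nil => exact absurd rfl hne
    | cons x t =>
      simp only [pvOuter, pv_min?_eq_foldl, List.foldl_cons]
      have : pvStep (fun s => pvRankGo (PySem.Str.lower s) [] 0) none x = some x := rfl
      rw [this, pv_stay_zero _ t x rfl]
      rfl
  | cons p ps ih =>
    intro sigs hne
    set key : String → Nat := fun s => pvRankGo (PySem.Str.lower s) (p :: ps) 0 with hkey
    have hkey_eq : ∀ s, key s =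
        if PySem.Str.isIn (PySem.Str.lower p) (PySem.Str.lower s)
        then 0 else 1 + pvRankGo (PySem.Str.lower s) ps 0 := by
      intro s
      rw [hkey]
      simp only [pvRankGo]
      split
      · rfl
      · exact pv_rankGo_shift _ ps 1
    have hkey_zero : ∀ s, (PySem.Str.isIn (PySem.Str.lower p) (PySem.Str.lower s)) = true ↔ key s = 0 := by
      intro s
      rw [hkey_eq s]
      constructor
      · intro h; rw [if_pos h]
      · intro h
        by_cases hm : PySem.Str.isIn (PySem.Str.lower p) (PySem.Str.lower s) = true
        · exact hm
        · rw [if_neg hm] at h; omega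
    cases hinner : pvInner p sigs with
    | some s₀ =>
      -- A returns s₀, the first sig matching priority p; B's min reaches the same element
      simp only [pvOuter, hinner]
      rw [pv_inner_eq_find?] at hinner
      cases sigs with
      | nil => exact absurd rfl hne
      | cons x t =>
        rw [pv_min?_eq_foldl, List.foldl_cons]
        have hx1 : pvStep key none x = some x := rfl
        rw [hx1]
        by_cases hx : (PySem.Str.isIn (PySem.Str.lower p) (PySem.Str.lower x)) = true
        · rw [List.find?_cons_of_pos (p := fun s => PySem.Str.isIn (PySem.Str.lower p) (PySem.Str.lower s)) (by simpa using hx)] at hinner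
          injection hinner with h'
          subst h'
          rw [pv_stay_zero key t x ((hkey_zero x).mp hx)]
          rfl
        · rw [List.find?_cons_of_neg (by simpa using hx)] at hinner
          have hx0 : key x ≠ 0 := fun h0 => hx ((hkey_zero x).mpr h0)
          rw [pv_first_zero key _ hkey_zero t x s₀ hx0 hinner]
          rfl
    | none =>
      -- no sig matches p: every key is 1 + its ps-rank; drop the shift and use the IH
      simp only [pvOuter, hinner]
      rw [pv_inner_eq_find?] at hinner
      have hno : ∀ s ∈ sigs, (PySem.Str.isIn (PySem.Str.lower p) (PySem.Str.lower s)) ≠ true := by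
        intro s hs
        exact fun h => by simpa using List.find?_eq_none.mp hinner s hs h
      have hcongr : PySem.List.min? sigs key =
          PySem.List.min? sigs (fun s => 1 + pvRankGo (PySem.Str.lower s) ps 0) := by
        rw [pv_min?_eq_foldl, pv_min?_eq_foldl]
        refine pv_congr _ _ sigs none ?_ (by intro m h; cases h)
        intro s hs
        rw [hkey_eq s, if_neg (by simpa using hno s hs)]
      rw [hcongr, pv_min?_eq_foldl, pv_shift, ← pv_min?_eq_foldl]
      exact ih sigs hne

-- ===== VERDICT (by name: the statement is the Claim_ definition above) =====
theorem pick_most_significant_py_spec : Claim_equal_pick_most_significant_py := by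
  intro sigs _
  unfold Spec_pick_most_significant_py pick_most_significant_py pick_most_significant_py_alt
  by_cases h : sigs = []
  · simp [h]
  · rw [if_neg h, if_neg h]
    exact pv_main pvPriorities sigs h
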